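-- pv_equiv track=rewrite | github.com/Ispanicus/geoguessr-ai | notebooks/Utils.py | filter_classes_one
-- ===== SOURCE A (Python) =====
-- def filter_classes_one(gold,predict,selection):
--     """ Given single class "selection" filter all other classes to "other" if there are no false positive or false negatives involving those classes and the selection. This allows qualitative analysis of single class
--         Input:
--                 gold: list of true labels
--                 predict: list of predictions (i.e top1 prediction from predicts)
--                 selection: string of selected class
--         Output:
--                 goldsel: list of true labels with filtered classes changed to "other"
--                 predsel: list of predictions with filtered classes changed to "other"
--                 indices: list of indices which helps find relevant image files"""
--
--     goldsel = []
--     predsel = []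
--     indices = []
--     for i, (g, p) in enumerate(zip(gold,predict)):
--
--         if g == selection or p == selection:
--             indices.append(i)
--             goldsel.append(g)
--             predsel.append(p)
--         else:
--             g = "other"
--             if p == selection:
--                 indices.append(i)
--                 goldsel.append(g)
--                 predsel.append(p)
--             else:
--                 continue
--
--     return goldsel, predsel, indices
-- ===== SOURCE B (Python) =====
-- def filter_classes_one(gold, predict, selection):
--     n = min(len(gold), len(predict))
--     gi = [i for i in range(n) if gold[i] == selection]
--     pi = [i for i in range(n) if predict[i] == selection]
--     indices = _merge_union(gi, pi)
--     goldsel = [gold[i] for i in indices]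
--     predsel = [predict[i] for i in indices]
--     return goldsel, predsel, indices
--
-- def _merge_union(xs, ys):
--     # merge-union of two strictly increasing index lists
--     out = []
--     a = b = 0
--     while a < len(xs) and b < len(ys):
--         if xs[a] < ys[b]:
--             out.append(xs[a]); a += 1
--         elif ys[b] < xs[a]:
--             out.append(ys[b]); b += 1
--         else:
--             out.append(xs[a]); a += 1; b += 1
--     out.extend(xs[a:])
--     out.extend(ys[b:])
--     return out
-- ===== Notes on version B (the rewrite author's own statement) =====
-- stated objective: alternative
-- what changed: Replaces A's single pass that appends matching pairs to three accumulator lists by a different algorithm: two independent scans collect the positions where gold (resp. predict) equals the selection as two strictly increasing index lists, a two-pointer merge-union combines them into the sorted index list, and two gather passes build goldsel/predsel by indexing.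
import Mathlib
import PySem

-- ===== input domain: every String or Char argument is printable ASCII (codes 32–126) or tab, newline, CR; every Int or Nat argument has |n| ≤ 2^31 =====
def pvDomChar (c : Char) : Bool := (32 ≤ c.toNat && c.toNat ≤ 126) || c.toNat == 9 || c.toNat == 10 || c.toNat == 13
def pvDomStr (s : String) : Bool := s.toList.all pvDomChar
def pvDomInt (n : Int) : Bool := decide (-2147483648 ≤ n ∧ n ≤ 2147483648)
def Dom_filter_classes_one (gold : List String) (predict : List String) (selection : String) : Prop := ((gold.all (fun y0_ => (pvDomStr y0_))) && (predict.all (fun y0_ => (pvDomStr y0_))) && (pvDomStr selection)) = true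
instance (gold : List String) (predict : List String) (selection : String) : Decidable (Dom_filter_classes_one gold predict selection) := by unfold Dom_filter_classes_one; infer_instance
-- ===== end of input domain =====

-- B replaces A's single appending loop by a different algorithm: two index scans
-- (positions where gold / predict equals the selection), a two-pointer merge-union
-- of the two strictly increasing index lists, then two gather passes. Same cost.

-- ===== PORT A =====
-- single loop over enumerate(zip(gold,predict)), appending to three accumulators;
-- the inner 'if p == selection' of A's else-branch is kept even though it can never fire
def filter_classes_one (gold : List String) (predict : List String) (selection : String) : List String × List String × List Int :=
  (PySem.List.enumerate (gold.zip predict) 0).foldl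
    (fun (acc : List String × List String × List Int) ip =>
      if ip.2.1 = selection ∨ ip.2.2 = selection then
        (acc.1 ++ [ip.2.1], acc.2.1 ++ [ip.2.2], acc.2.2 ++ [ip.1])
      else
        -- g = "other"
        if ip.2.2 = selection then
          (acc.1 ++ ["other"], acc.2.1 ++ [ip.2.2], acc.2.2 ++ [ip.1])
        else acc)
    ([], [], [])

-- ===== PORT B =====
-- _merge_union: the two-pointer while loop of Source B as the obvious structural recursion
-- on the two suffixes still to be consumed (the trailing extends are the base cases)
def pvMergeUnion : List Int → List Int → List Int
  | [], ys => ys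
  | x :: xs, [] => x :: xs
  | x :: xs, y :: ys =>
    if x < y then x :: pvMergeUnion xs (y :: ys)
    else if y < x then y :: pvMergeUnion (x :: xs) ys
    else x :: pvMergeUnion xs ys
termination_by a b => a.length + b.length
decreasing_by all_goals simp <;> omega

-- two index scans over range(n), merge-union, then two gather passes
-- (gold[i] / predict[i] with 0 ≤ i < min of the lengths: always in range, so pyGetD is exact)
def filter_classes_one_alt (gold : List String) (predict : List String) (selection : String) : List String × List String × List Int :=
  let n : Int := min (gold.length : Int) (predict.length : Int)
  let gi := (PySem.List.pyRange 0 n 1).filter (fun i => PySem.List.pyGetD gold i "" == selection)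
  let pi := (PySem.List.pyRange 0 n 1).filter (fun i => PySem.List.pyGetD predict i "" == selection)
  let indices := pvMergeUnion gi pi
  (indices.map (fun i => PySem.List.pyGetD gold i ""),
   indices.map (fun i => PySem.List.pyGetD predict i ""),
   indices)

-- ===== PRECONDITION & SPEC =====
def Spec_filter_classes_one (gold : List String) (predict : List String) (selection : String) (out : List String × List String × List Int) : Prop := out = filter_classes_one_alt gold predict selection
instance (gold : List String) (predict : List String) (selection : String) (out : List String × List String × List Int) : Decidable (Spec_filter_classes_one gold predict selection out) := by unfold Spec_filter_classes_one; infer_instance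

-- ===== CLAIM (what is proved, stated in full; the proofs are below) =====
def Claim_equal_filter_classes_one : Prop := ∀ (gold : List String) (predict : List String) (selection : String), Dom_filter_classes_one gold predict selection → Spec_filter_classes_one gold predict selection (filter_classes_one gold predict selection)

-- ===== LEMMAS AND PROOFS =====

theorem pvMergeUnion_nil_right (xs : List Int) : pvMergeUnion xs [] = xs := by
  cases xs <;> simp [pvMergeUnion]

-- if x is below everything in ys, it comes out first
theorem pvMergeUnion_cons_left (x : Int) (xs ys : List Int) (h : ∀ y ∈ ys, x < y) :
    pvMergeUnion (x :: xs) ys = x :: pvMergeUnion xs ys := by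
  cases ys with
  | nil => simp [pvMergeUnion_nil_right]
  | cons y ys => simp [pvMergeUnion, h y (by simp)]

theorem pvMergeUnion_cons_right (y : Int) (xs ys : List Int) (h : ∀ x ∈ xs, y < x) :
    pvMergeUnion xs (y :: ys) = y :: pvMergeUnion xs ys := by
  cases xs with
  | nil => simp [pvMergeUnion]
  | cons x xs =>
    have hx := h x (by simp)
    simp [pvMergeUnion, hx, not_lt_of_gt hx]

-- merge-union of two filters of one strictly increasing list is the filter of the disjunction
theorem pvMergeUnion_filter (p q : Int → Bool) (l : List Int) (h : l.Pairwise (· < ·)) :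
    pvMergeUnion (l.filter p) (l.filter q) = l.filter (fun x => p x || q x) := by
  induction l with
  | nil => simp [pvMergeUnion]
  | cons x xs ih =>
    rw [List.pairwise_cons] at h
    have hlt := h.1
    have ih' := ih h.2
    have hp' : ∀ y ∈ xs.filter p, x < y := fun y hy => hlt y (List.mem_of_mem_filter hy)
    have hq' : ∀ y ∈ xs.filter q, x < y := fun y hy => hlt y (List.mem_of_mem_filter hy)
    by_cases hp : p x = true <;> by_cases hq : q x = true
    · simp [hp, hq, pvMergeUnion, ih']
    · simp [hp, hq, pvMergeUnion_cons_left x _ _ hq', ih']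
    · simp [hp, hq, pvMergeUnion_cons_right x _ _ hp', ih']
    · simp [hp, hq, ih']

-- a loop appending to three accumulators under one test is one filter and three maps
theorem foldl_triple_append {α : Type} (p : α → Bool) (f1 f2 : α → String) (f3 : α → Int)
    (l : List α) (a b : List String) (c : List Int) :
    l.foldl (fun acc x => if p x then (acc.1 ++ [f1 x], acc.2.1 ++ [f2 x], acc.2.2 ++ [f3 x]) else acc) (a, b, c)
      = (a ++ (l.filter p).map f1, b ++ (l.filter p).map f2, c ++ (l.filter p).map f3) := by
  induction l generalizing a b c with
  | nil => simp
  | cons x xs ih =>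
    by_cases h : p x = true <;> simp [h, ih]

-- enumerate over a list is the index range mapped through indexing
theorem enumerate_eq_range_map {α : Type} (xs : List α) (d : α) (s : Int) :
    PySem.List.enumerate xs s
      = (PySem.List.pyRange s (s + xs.length) 1).map (fun i => (i, PySem.List.pyGetD xs (i - s) d)) := by
  induction xs generalizing s with
  | nil => simp [PySem.List.enumerate_nil, PySem.List.pyRange_one_eq_nil]
  | cons x xs ih =>
    rw [PySem.List.enumerate_cons, ih (s + 1)]
    have hcons : PySem.List.pyRange s (s + ((x :: xs).length : Int)) 1
        = s :: PySem.List.pyRange (s + 1) (s + ((x :: xs).length : Int)) 1 := by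
      exact PySem.List.pyRange_one_cons (by push_cast [List.length_cons]; omega)
    have h1 : s + ((x :: xs).length : Int) = (s + 1) + (xs.length : Int) := by push_cast [List.length_cons]; omega
    rw [hcons, List.map_cons, h1]
    congr 1
    · simp [PySem.List.pyGetD_zero_cons]
    · apply List.map_congr_left
      intro i hi
      rw [PySem.List.mem_pyRange_one] at hi
      have hsucc : (i - s).toNat = (i - (s + 1)).toNat + 1 := by omega
      rw [PySem.List.pyGetD_eq_getElem (x :: xs) d (by omega) (by push_cast [List.length_cons]; omega),
          PySem.List.pyGetD_eq_getElem xs d (by omega) (by omega)]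
      simp [hsucc]

-- ===== VERDICT (by name: the statement is the Claim_ definition above) =====
theorem filter_classes_one_spec : Claim_equal_filter_classes_one := by
  intro gold predict selection _
  unfold Spec_filter_classes_one filter_classes_one filter_classes_one_alt
  dsimp only
  -- A's dead inner branch disappears: under ¬(g = sel ∨ p = sel) we have p ≠ sel
  have hdead := PySem.List.foldl_congr_mem
      (l := PySem.List.enumerate (gold.zip predict) 0)
      (init := (([], [], []) : List String × List String × List Int))
      (f := fun acc ip =>
        if ip.2.1 = selection ∨ ip.2.2 = selection then
          (acc.1 ++ [ip.2.1], acc.2.1 ++ [ip.2.2], acc.2.2 ++ [ip.1])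
        else
          if ip.2.2 = selection then
            (acc.1 ++ ["other"], acc.2.1 ++ [ip.2.2], acc.2.2 ++ [ip.1])
          else acc)
      (g := fun acc ip =>
        if (ip.2.1 == selection || ip.2.2 == selection) then
          (acc.1 ++ [ip.2.1], acc.2.1 ++ [ip.2.2], acc.2.2 ++ [ip.1])
        else acc)
      (by intro acc ip _
          by_cases h1 : ip.2.1 = selection <;> by_cases h2 : ip.2.2 = selection <;>
            simp [h1, h2])
  rw [hdead, foldl_triple_append,
      enumerate_eq_range_map (gold.zip predict) ("", "") 0]
  simp only [sub_zero, zero_add]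
  -- B's range bound equals the zip length
  have hn : ((gold.zip predict).length : Int) = min (gold.length : Int) (predict.length : Int) := by
    simp [List.length_zip]
  rw [hn]
  set R := PySem.List.pyRange 0 (min (gold.length : Int) (predict.length : Int)) 1 with hR
  -- on R, indexing the zip is indexing the components
  have hmem : ∀ i ∈ R, PySem.List.pyGetD (gold.zip predict) i ("", "")
      = (PySem.List.pyGetD gold i "", PySem.List.pyGetD predict i "") := by
    intro i hi
    rw [hR, PySem.List.mem_pyRange_one] at hi
    have h1 : i.toNat < gold.length := by omega
    have h2 : i.toNat < predict.length := by omega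
    rw [PySem.List.pyGetD_eq_getElem (gold.zip predict) ("", "") (by omega) (by push_cast [List.length_zip]; omega),
        PySem.List.pyGetD_eq_getElem gold "" (by omega) (by omega),
        PySem.List.pyGetD_eq_getElem predict "" (by omega) (by omega)]
    simp [List.getElem_zip]
  rw [pvMergeUnion_filter _ _ R (by rw [hR]; exact PySem.List.pairwise_lt_pyRange_one 0 _)]
  rw [List.filter_map]
  have hfc : R.filter ((fun ip => ip.2.1 == selection || ip.2.2 == selection) ∘
        (fun i => (i, PySem.List.pyGetD (gold.zip predict) i ("", ""))))
      = R.filter (fun i => PySem.List.pyGetD gold i "" == selection || PySem.List.pyGetD predict i "" == selection) := by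
    apply List.filter_congr
    intro i hi
    simp [hmem i hi]
  rw [hfc]
  set F := R.filter (fun i => PySem.List.pyGetD gold i "" == selection || PySem.List.pyGetD predict i "" == selection) with hF
  have hFsub : ∀ i ∈ F, i ∈ R := fun i hi => List.mem_of_mem_filter hi
  refine Prod.ext ?_ (Prod.ext ?_ ?_) <;> simp only [List.map_map, List.nil_append]
  · apply List.map_congr_left
    intro i hi
    simp [Function.comp, hmem i (hFsub i hi)]
  · apply List.map_congr_left
    intro i hi
    simp [Function.comp, hmem i (hFsub i hi)]
  · simp [Function.comp_def]
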